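-- pv_equiv track=rewrite | github.com/kai9987kai/Supermix_29 | source/training_monitor_gui.py | _summarize_err_tail
-- ===== SOURCE A (Python) =====
-- from typing import Any, Dict, List, Optional, Sequence, Tuple
--
-- def _summarize_err_tail(err_lines: Sequence[str]) -> Tuple[str, str]:
--     if not err_lines:
--         return "ok", "-"
--
--     for raw in reversed(list(err_lines)):
--         line = str(raw).strip()
--         if not line:
--             continue
--         low = line.lower()
--         if low.startswith("loading weights:"):
--             continue
--         if "traceback" in low:
--             return "error", "Traceback detected"
--         if "error" in low or "exception" in low:
--             if "userwarning" in low: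
--                 return "warn", line[:140]
--             return "error", line[:140]
--         if "warning" in low:
--             return "warn", line[:140]
--     return "ok", "-"
-- ===== SOURCE B (Python) =====
-- def _summarize_err_tail(err_lines):
--     def classify(raw):
--         line = str(raw).strip()
--         low = line.lower()
--         if not line or low.startswith("loading weights:"):
--             return None
--         t = "traceback" in low
--         e = "error" in low or "exception" in low
--         w = "warning" in low
--         u = "userwarning" in low
--         if not (t or e or w):
--             return None
--         status = "error" if t or (e and not u) else "warn"
--         detail = "Traceback detected" if t else line[:140]
--         return (status, detail)
--
--     hits = [c for c in map(classify, err_lines) if c is not None]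
--     return hits[-1] if hits else ("ok", "-")
-- ===== Notes on version B (the rewrite author's own statement) =====
-- stated objective: alternative
-- what changed: A walks the reversed list with a nested branch cascade and returns at the first classified line; B classifies each line by computing keyword flags once and deriving status and detail from two flat boolean formulas, maps this classifier over the list, filters the hits, and returns the last hit (or the ok default).
import Mathlib
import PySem

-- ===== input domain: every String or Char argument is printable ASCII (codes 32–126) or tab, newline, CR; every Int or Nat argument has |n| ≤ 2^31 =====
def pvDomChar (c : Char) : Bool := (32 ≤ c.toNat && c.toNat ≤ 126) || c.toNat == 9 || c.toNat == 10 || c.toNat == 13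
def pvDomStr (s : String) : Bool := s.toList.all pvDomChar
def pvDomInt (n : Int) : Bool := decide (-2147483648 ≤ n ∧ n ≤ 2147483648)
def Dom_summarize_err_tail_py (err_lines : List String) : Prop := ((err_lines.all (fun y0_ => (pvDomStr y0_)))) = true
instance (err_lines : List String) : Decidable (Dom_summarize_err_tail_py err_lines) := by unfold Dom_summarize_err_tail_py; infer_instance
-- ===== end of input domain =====

-- ===== PORT A =====
-- B replaces A's reversed early-return branch cascade by a flag-based classifier mapped/filtered over the list, taking the last hit; same return values.
def summarizeA_loop : List String → String × String
  | [] => ("ok", "-")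
  | raw :: rest =>
      let line := PySem.Str.strip raw
      if PySem.Str.len line = 0 then summarizeA_loop rest
      else
        let low := PySem.Str.lower line
        if PySem.Str.startswith low "loading weights:" then summarizeA_loop rest
        else if PySem.Str.isIn "traceback" low then ("error", "Traceback detected")
        else if PySem.Str.isIn "error" low || PySem.Str.isIn "exception" low then
          if PySem.Str.isIn "userwarning" low then ("warn", PySem.Str.slice line none (some 140))
          else ("error", PySem.Str.slice line none (some 140))
        else if PySem.Str.isIn "warning" low then ("warn", PySem.Str.slice line none (some 140))
        else summarizeA_loop rest

def summarize_err_tail_py (err_lines : List String) : String × String :=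
  if err_lines = [] then ("ok", "-")
  else summarizeA_loop err_lines.reverse

-- ===== PORT B =====
def classifyB (raw : String) : Option (String × String) :=
  let line := PySem.Str.strip raw
  let low := PySem.Str.lower line
  if PySem.Str.len line = 0 || PySem.Str.startswith low "loading weights:" then none
  else
    let t := PySem.Str.isIn "traceback" low
    let e := PySem.Str.isIn "error" low || PySem.Str.isIn "exception" low
    let w := PySem.Str.isIn "warning" low
    let u := PySem.Str.isIn "userwarning" low
    if !(t || e || w) then none
    else
      some (if t || (e && !u) then "error" else "warn",
            if t then "Traceback detected" else PySem.Str.slice line none (some 140))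

def summarize_err_tail_py_alt (err_lines : List String) : String × String :=
  (((err_lines.map classifyB).filterMap id).getLast?).getD ("ok", "-")

-- ===== PRECONDITION & SPEC =====
def Spec_summarize_err_tail_py (err_lines : List String) (out : String × String) : Prop := out = summarize_err_tail_py_alt err_lines
instance (err_lines : List String) (out : String × String) : Decidable (Spec_summarize_err_tail_py err_lines out) := by unfold Spec_summarize_err_tail_py; infer_instance

-- ===== CLAIM =====
def Claim_equal_summarize_err_tail_py : Prop := ∀ (err_lines : List String), Dom_summarize_err_tail_py err_lines → Spec_summarize_err_tail_py err_lines (summarize_err_tail_py err_lines)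

-- ===== LEMMAS AND PROOFS =====

-- A's branch cascade computes exactly B's flag-based classification (step lemma)
theorem summarizeA_loop_cons (raw : String) (rest : List String) :
    summarizeA_loop (raw :: rest) =
      match classifyB raw with
      | some c => c
      | none => summarizeA_loop rest := by
  simp only [summarizeA_loop, classifyB]
  by_cases h0 : PySem.Str.len (PySem.Str.strip raw) = 0
  · simp_all
  · by_cases h1 : PySem.Str.startswith (PySem.Str.lower (PySem.Str.strip raw)) "loading weights:" = true
    · simp_all
    · by_cases ht : PySem.Str.isIn "traceback" (PySem.Str.lower (PySem.Str.strip raw)) = true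
      · simp_all
      · by_cases hu : PySem.Str.isIn "userwarning" (PySem.Str.lower (PySem.Str.strip raw)) = true <;>
          by_cases hw : PySem.Str.isIn "warning" (PySem.Str.lower (PySem.Str.strip raw)) = true <;>
          by_cases h2 : PySem.Str.isIn "error" (PySem.Str.lower (PySem.Str.strip raw)) = true <;>
          by_cases h3 : PySem.Str.isIn "exception" (PySem.Str.lower (PySem.Str.strip raw)) = true <;>
          simp_all

-- A's loop is the first classification found in its list, default ("ok","-")
theorem summarizeA_loop_eq (xs : List String) :
    summarizeA_loop xs = (xs.findSome? classifyB).getD ("ok", "-") := by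
  induction xs with
  | nil => rfl
  | cons raw rest ih =>
      rw [summarizeA_loop_cons, List.findSome?_cons]
      cases classifyB raw <;> simp [ih]

-- the last kept hit of a forward filterMap is the first hit of the reversed list
theorem getLast?_filterMap_eq (xs : List String) :
    ((xs.filterMap classifyB).getLast?) = xs.reverse.findSome? classifyB := by
  induction xs with
  | nil => rfl
  | cons raw rest ih =>
      rw [List.reverse_cons, List.findSome?_append, List.filterMap_cons]
      cases hc : classifyB raw with
      | none => simp [hc, ih]
      | some c =>
          cases h : rest.filterMap classifyB with
          | nil =>
              rw [h] at ih
              simp [hc, ← ih]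
          | cons y ys =>
              rw [h] at ih
              cases hz : (y :: ys).getLast? with
              | none => simp at hz
              | some z => simp [hc, List.getLast?_cons_cons, ← ih, hz]

-- ===== VERDICT =====
set_option maxHeartbeats 1000000 in
theorem summarize_err_tail_py_spec : Claim_equal_summarize_err_tail_py := by
  intro err_lines _
  unfold Spec_summarize_err_tail_py summarize_err_tail_py summarize_err_tail_py_alt
  rw [List.filterMap_map]
  simp only [Function.id_comp]
  rw [getLast?_filterMap_eq]
  cases err_lines with
  | nil => rfl
  | cons a l => simp [summarizeA_loop_eq]
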